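-- pv_equiv track=rewrite | github.com/atheridis/aptbot | aptbot/bot.py | _replace_escaped_space_in_tags
-- ===== SOURCE A (Python) =====
-- def _replace_escaped_space_in_tags(tag_value: str) -> str:
--     new_tag_value = ""
--     ignore_next = False
--     for i in range(len(tag_value)):
--         if ignore_next:
--             ignore_next = False
--             continue
--         if not tag_value[i] == "\\":
--             new_tag_value += tag_value[i]
--             ignore_next = False
--             continue
--         if i + 1 == len(tag_value):
--             new_tag_value += tag_value[i]
--             break
--         if tag_value[i + 1] == "\\":
--             new_tag_value += "\\"
--         elif tag_value[i + 1] == "s":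
--             new_tag_value += " "
--         ignore_next = True
--     return new_tag_value
-- ===== SOURCE B (Python) =====
-- def _replace_escaped_space_in_tags(tag_value: str) -> str:
--     # Stage 1: split once on the escape character; every boundary marks one backslash.
--     parts = tag_value.split("\\")
--     out = [parts[0]]
--     i = 1
--     n = len(parts)
--     # Stage 2: walk the remaining parts; each part starts right after a backslash.
--     while i < n:
--         p = parts[i]
--         if p:
--             # the first char of p is the escaped char, the rest is literal text
--             out.append((" " if p[0] == "s" else "") + p[1:])
--             i += 1
--         elif i + 1 < n:
--             # empty part between two backslashes: an escaped backslash; the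
--             # following part is literal text (its backslash was consumed as data)
--             out.append("\\")
--             out.append(parts[i + 1])
--             i += 2
--         else:
--             # lone trailing backslash passes through
--             out.append("\\")
--             i += 1
--     return "".join(out)
-- ===== Notes on version B (the rewrite author's own statement) =====
-- stated objective: alternative
-- what changed: Replaces A's per-character scan with an ignore_next skip flag by a two-stage pass: split the string once on the backslash, then map each subsequent part (whose first character is the escaped character) and join, handling escaped backslashes as empty parts.
import Mathlib
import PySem

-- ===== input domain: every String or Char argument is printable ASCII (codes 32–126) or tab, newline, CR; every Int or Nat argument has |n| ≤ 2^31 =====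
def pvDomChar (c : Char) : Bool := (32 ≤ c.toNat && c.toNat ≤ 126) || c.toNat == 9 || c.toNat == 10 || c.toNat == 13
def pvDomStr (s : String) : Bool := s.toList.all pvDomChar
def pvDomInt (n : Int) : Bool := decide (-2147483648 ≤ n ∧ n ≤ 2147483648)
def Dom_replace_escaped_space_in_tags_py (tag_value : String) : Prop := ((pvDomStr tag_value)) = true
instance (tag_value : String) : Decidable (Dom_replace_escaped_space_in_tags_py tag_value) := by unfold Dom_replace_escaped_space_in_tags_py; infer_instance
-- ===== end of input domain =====

-- B replaces A's per-character scan with an ignore_next flag by a two-stage pass: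
-- split once on the backslash, then map the parts (each starting with the escaped
-- char) and join; same return value on every input (objective: alternative).

-- ===== PORT A =====
-- A's `for i in range(len(tag_value))` with the `ignore_next` flag, transliterated as a
-- structural recursion over the character list (tag_value[i+1] = head of the tail),
-- with the string accumulator `new_tag_value`.
def pvALoop : List Char → String → Bool → String
  | [], acc, _ => acc
  | _ :: rest, acc, true => pvALoop rest acc false          -- if ignore_next: continue
  | c :: rest, acc, false =>
    if ¬ c = '\\' then pvALoop rest (acc ++ String.singleton c) false
    else match rest with
      | [] => acc ++ String.singleton c                      -- i + 1 == len: append and break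
      | d :: _ =>
        if d = '\\' then pvALoop rest (acc ++ "\\") true
        else if d = 's' then pvALoop rest (acc ++ " ") true
        else pvALoop rest acc true

def replace_escaped_space_in_tags_py (tag_value : String) : String :=
  pvALoop tag_value.toList "" false

-- ===== PORT B =====
-- Source B's while-loop over parts[1:]: a part that `if p:` is truthy maps its first char
-- ('s' → ' ', anything else → dropped) and keeps the rest literally; an empty part
-- followed by another part is an escaped backslash whose following part is literal
-- (consumed with i += 2); an empty last part is the lone trailing backslash.
-- Pieces are kept as List Char; the final `"".join(out)` is the flatten at the end.
def pvBWalk : List (List Char) → List (List Char)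
  | [] => []
  | (c :: p) :: rest => ((if c = 's' then [' '] else []) ++ p) :: pvBWalk rest
  | [] :: q :: rest' => ['\\'] :: q :: pvBWalk rest'
  | [[]] => [['\\']]

-- `tag_value.split("\\")` ported as List.splitOn on the code points: exact for a
-- one-character separator.
def replace_escaped_space_in_tags_py_alt (tag_value : String) : String :=
  let parts := tag_value.toList.splitOn '\\'
  String.ofList (parts.headI ++ (pvBWalk parts.tail).flatten)   -- out = [parts[0]] ++ …; "".join

-- ===== PRECONDITION & SPEC =====
def Spec_replace_escaped_space_in_tags_py (tag_value : String) (out : String) : Prop := out = replace_escaped_space_in_tags_py_alt tag_value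
instance (tag_value : String) (out : String) : Decidable (Spec_replace_escaped_space_in_tags_py tag_value out) := by unfold Spec_replace_escaped_space_in_tags_py; infer_instance

-- ===== CLAIM =====
def Claim_equal_replace_escaped_space_in_tags_py : Prop := ∀ (tag_value : String), Dom_replace_escaped_space_in_tags_py tag_value → Spec_replace_escaped_space_in_tags_py tag_value (replace_escaped_space_in_tags_py tag_value)

-- ===== LEMMAS AND PROOFS =====

-- proof-only helper: the pair-consuming reading of the escape grammar, on char lists
def pvSpecL : List Char → List Char
  | [] => []
  | c :: rest =>
    if c ≠ '\\' then c :: pvSpecL rest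
    else match rest with
      | [] => ['\\']
      | d :: rest' => (if d = '\\' then ['\\'] else if d = 's' then [' '] else []) ++ pvSpecL rest'

lemma pv_A_eq_spec : ∀ (l : List Char) (acc : String),
    pvALoop l acc false = acc ++ String.ofList (pvSpecL l) := by
  intro l
  fun_induction pvSpecL l with
  | case1 => intro acc; apply String.toList_inj.mp; simp [pvALoop]
  | case2 c rest hc ih =>
      intro acc
      simp only [ne_eq] at hc
      simp only [pvALoop, if_pos hc]
      rw [ih]
      apply String.toList_inj.mp
      simp
  | case3 c hc =>
      intro acc
      simp only [ne_eq, not_not] at hc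
      subst hc
      simp only [pvALoop]
      apply String.toList_inj.mp
      simp
  | case4 c hc d rest' ih =>
      intro acc
      simp only [ne_eq, not_not] at hc
      subst hc
      by_cases hd : d = '\\'
      · subst hd
        have h1 : pvALoop ('\\' :: '\\' :: rest') acc false
            = pvALoop rest' (acc ++ "\\") false := by simp [pvALoop]
        rw [h1, ih]
        apply String.toList_inj.mp
        simp
      · by_cases hs : d = 's'
        · subst hs
          have h1 : pvALoop ('\\' :: 's' :: rest') acc false
              = pvALoop rest' (acc ++ " ") false := by simp [pvALoop]
          rw [h1, ih]
          apply String.toList_inj.mp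
          simp [hd]
        · have h1 : pvALoop ('\\' :: d :: rest') acc false
              = pvALoop rest' acc false := by simp [pvALoop, hd, hs]
          rw [h1, ih]
          apply String.toList_inj.mp
          simp [hd, hs]

lemma pv_B_eq_spec : ∀ (l : List Char),
    (l.splitOn '\\').headI ++ (pvBWalk (l.splitOn '\\').tail).flatten = pvSpecL l := by
  intro l
  fun_induction pvSpecL l with
  | case1 => decide
  | case2 c rest hc ih =>
      simp only [ne_eq] at hc
      obtain ⟨p0, t, hpt⟩ := List.exists_cons_of_ne_nil
        (List.splitOnP_ne_nil (p := fun x => x == '\\') rest)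
      simp only [List.splitOn] at ih ⊢
      rw [List.splitOnP_cons]
      have hcb : (c == '\\') = false := by simp [hc]
      rw [hcb]
      rw [hpt] at ih ⊢
      simp only [List.modifyHead, List.headI, List.tail] at ih ⊢
      simp [← ih]
  | case3 c hc =>
      simp only [ne_eq, not_not] at hc
      subst hc
      decide
  | case4 c hc d rest' ih =>
      simp only [ne_eq, not_not] at hc
      subst hc
      simp only [List.splitOn] at ih ⊢
      rw [List.splitOnP_cons]
      simp only [BEq.rfl, if_true, List.headI, List.tail, List.nil_append]
      obtain ⟨p0, t, hpt⟩ := List.exists_cons_of_ne_nil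
        (List.splitOnP_ne_nil (p := fun x => x == '\\') rest')
      by_cases hd : d = '\\'
      · subst hd
        rw [List.splitOnP_cons]
        simp only [BEq.rfl, if_true]
        rw [hpt] at ih ⊢
        simp only [List.headI, List.tail] at ih ⊢
        simp [pvBWalk, ← ih]
      · rw [List.splitOnP_cons]
        have hdb : (d == '\\') = false := by simp [hd]
        rw [hdb]
        rw [hpt] at ih ⊢
        simp only [List.modifyHead, List.headI, List.tail] at ih ⊢
        simp [pvBWalk, hd, ← ih]

-- ===== VERDICT =====
theorem replace_escaped_space_in_tags_py_spec : Claim_equal_replace_escaped_space_in_tags_py := by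
  intro tv _
  show _ = _
  rw [replace_escaped_space_in_tags_py, replace_escaped_space_in_tags_py_alt,
    pv_A_eq_spec, ← pv_B_eq_spec tv.toList]
  apply String.toList_inj.mp
  simp
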